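-- pv_equiv track=rewrite | github.com/MrBrantCode/unitest_baseline | mut_generate/mist_train_cf/cf_47259/solution.py | primesLessThanInFibonacci
-- ===== SOURCE A (Python) =====
-- def primesLessThanInFibonacci(n):
--     # Creating an array of booleans of length n+1
--     sieve = [True] * (n+1)
--     for x in range(2, int(n**0.5) + 1):
--         if sieve[x]:
--             for i in range(x*x, n+1, x):
--                 sieve[i] = False
--     primes = [p for p in range(2, n) if sieve[p]]
--
--     # Creating a generator for Fibonacci sequence
--     def fib():
--         a, b = 0, 1
--         while True:
--             yield a
--             a, b = b, a + b
--
--     fibs = fib()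
--     fib_nums = []
--     curr_fib = next(fibs)
--
--     while curr_fib < n:
--         fib_nums.append(curr_fib)
--         curr_fib = next(fibs)
--
--     # Return prime numbers from Fibonacci sequence
--     return [num for num in fib_nums if num in primes]
-- ===== SOURCE B (Python) =====
-- def primesLessThanInFibonacci(n):
--     # Single pass over the O(log n) Fibonacci numbers below n,
--     # testing each by trial division (no sieve of size n).
--     def is_prime(m):
--         if m < 2:
--             return False
--         d = 2
--         while d * d <= m:
--             if m % d == 0:
--                 return False
--             d += 1
--         return True
--
--     result = []
--     a, b = 0, 1
--     while a < n:
--         if is_prime(a):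
--             result.append(a)
--         a, b = b, a + b
--     return result
-- ===== Notes on version B (the rewrite author's own statement) =====
-- stated objective: faster
-- what changed: Instead of building a full Eratosthenes sieve over all numbers up to n and scanning the whole prime list for each Fibonacci number, B walks the O(log n) Fibonacci numbers below n once and checks each by trial division.
-- crash fix: A raises TypeError for negative n (int() of a complex square root); B returns [] there. — e.g. on primesLessThanInFibonacci(-5): A raises TypeError, B returns []
import Mathlib
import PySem

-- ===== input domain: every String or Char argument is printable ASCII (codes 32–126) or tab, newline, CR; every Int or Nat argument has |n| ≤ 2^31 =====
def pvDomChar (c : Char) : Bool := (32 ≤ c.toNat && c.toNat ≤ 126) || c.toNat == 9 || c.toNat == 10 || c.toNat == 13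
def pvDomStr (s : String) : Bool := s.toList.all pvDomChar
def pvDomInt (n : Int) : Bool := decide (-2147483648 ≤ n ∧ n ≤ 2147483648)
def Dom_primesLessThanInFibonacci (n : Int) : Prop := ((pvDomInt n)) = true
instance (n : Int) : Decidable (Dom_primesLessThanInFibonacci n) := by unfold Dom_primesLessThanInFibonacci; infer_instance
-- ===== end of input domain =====

-- B replaces A's size-n Eratosthenes sieve + list-membership scans by one pass over the
-- O(log n) Fibonacci numbers below n, testing each by trial division (objective: faster).

-- ===== PORT A =====
-- inner loop 'for i in range(x*x, n+1, x): sieve[i] = False' — the visited indices,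
-- as the Nat arithmetic progression Python's range denotes
def pvCnt (N x : Nat) : Nat := (N + 1 - x * x + (x - 1)) / x
def pvMults (N x : Nat) : List Nat := List.range' (x * x) (pvCnt N x) x
def pvSieveStep (N : Nat) (s : Array Bool) (x : Nat) : Array Bool :=
  if s[x]! then (pvMults N x).foldl (fun t i => t.set! i false) s else s
-- the sieve after 'for x in range(2, int(n**0.5)+1)'; int(n**0.5) = Nat.sqrt N exactly on the
-- nonnegative domain (the float sqrt is correctly rounded there and its floor is the integer sqrt)
def pvSieve (N : Nat) : Array Bool :=
  (List.range' 2 (Nat.sqrt N + 1 - 2)).foldl (pvSieveStep N) (Array.replicate (N + 1) true)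
-- 'while curr_fib < n: fib_nums.append(curr_fib); curr_fib = next(fibs)';
-- the fuel argument only makes the recursion structurally total: the loop runs fewer
-- times than the fuel the ports pass it, so the guard never triggers
def pvFibA (fuel : Nat) (n a b : Int) : List Int :=
  match fuel with
  | 0 => []
  | fuel + 1 => if a < n then a :: pvFibA fuel n b (a + b) else []

def primesLessThanInFibonacci (n : Int) : List Int :=
  let N := n.toNat
  let sieve := pvSieve N
  let primes := (PySem.List.pyRange 2 n).filter (fun p => sieve[p.toNat]!)
  (pvFibA (N + 4) n 0 1).filter (fun num => primes.contains num)

-- ===== PORT B =====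
-- trial-division loop 'while d*d <= m: if m % d == 0: return False; d += 1';
-- the fuel exceeds the loop's iteration count, a structural totality guard only
def pvTrial (fuel : Nat) (m d : Int) : Bool :=
  match fuel with
  | 0 => true
  | fuel + 1 =>
    if d * d ≤ m then
      (if PySem.Int.mod m d == 0 then false else pvTrial fuel m (d + 1))
    else true

def pvIsPrime (m : Int) : Bool := if m < 2 then false else pvTrial (m.toNat + 1) m 2

-- 'while a < n: if is_prime(a): result.append(a); a, b = b, a + b';
-- same fuel-style totality guard as in port A
def pvFibB (fuel : Nat) (n a b : Int) : List Int :=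
  match fuel with
  | 0 => []
  | fuel + 1 =>
    if a < n then (if pvIsPrime a then [a] else []) ++ pvFibB fuel n b (a + b)
    else []

def primesLessThanInFibonacci_alt (n : Int) : List Int := pvFibB (n.toNat + 4) n 0 1

-- ===== PRECONDITION & SPEC =====
-- A raises TypeError for negative n (int() applied to a complex square root)
def Pre_primesLessThanInFibonacci (n : Int) : Prop := 0 ≤ n
instance (n : Int) : Decidable (Pre_primesLessThanInFibonacci n) := by
  unfold Pre_primesLessThanInFibonacci; infer_instance
def pvWitness_primesLessThanInFibonacci : Int := 10

-- A raises TypeError on every negative n (a complex square root reaches int()); B returns [] there.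
def Raises_primesLessThanInFibonacci (n : Int) : Prop := n < 0
instance (n : Int) : Decidable (Raises_primesLessThanInFibonacci n) := by
  unfold Raises_primesLessThanInFibonacci; infer_instance
def pvRaiseWitness_primesLessThanInFibonacci : Int := -5
def pvRaiseWitnessOut_primesLessThanInFibonacci : List Int := []

def Spec_primesLessThanInFibonacci (n : Int) (out : List Int) : Prop :=
  out = primesLessThanInFibonacci_alt n
instance (n : Int) (out : List Int) : Decidable (Spec_primesLessThanInFibonacci n out) := by
  unfold Spec_primesLessThanInFibonacci; infer_instance

-- ===== CLAIM (what is proved, stated in full; the proofs are below) =====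
def Claim_equal_primesLessThanInFibonacci : Prop :=
  ∀ (n : Int), Dom_primesLessThanInFibonacci n → Pre_primesLessThanInFibonacci n →
    Spec_primesLessThanInFibonacci n (primesLessThanInFibonacci n)
def Claim_raises_primesLessThanInFibonacci : Prop :=
  (∀ (n : Int), Dom_primesLessThanInFibonacci n → Raises_primesLessThanInFibonacci n →
    ¬ Pre_primesLessThanInFibonacci n) ∧
  (Dom_primesLessThanInFibonacci (pvRaiseWitness_primesLessThanInFibonacci) ∧
   Raises_primesLessThanInFibonacci (pvRaiseWitness_primesLessThanInFibonacci) ∧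
   primesLessThanInFibonacci_alt (pvRaiseWitness_primesLessThanInFibonacci) =
     pvRaiseWitnessOut_primesLessThanInFibonacci)

-- ===== LEMMAS AND PROOFS =====

-- array get!/set! facts specialised to Bool (default = false)
theorem pvGetBang (xs : Array Bool) (i : Nat) :
    xs[i]! = if h : i < xs.size then xs[i] else false := by
  rw [Array.getElem!_eq_getD]; rfl

theorem pvGetBang_set (xs : Array Bool) (i j : Nat) (b : Bool) :
    (xs.set! i b)[j]! = if j = i ∧ j < xs.size then b else xs[j]! := by
  rw [pvGetBang, pvGetBang]
  simp only [Array.set!, Array.size_setIfInBounds]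
  by_cases hj : j < xs.size
  · rw [dif_pos hj, dif_pos hj, Array.getElem_setIfInBounds]
    by_cases hij : i = j
    · subst hij
      rw [if_pos rfl, if_pos ⟨rfl, hj⟩]
    · rw [if_neg hij, if_neg (fun hc => hij hc.1.symm)]
  · rw [dif_neg hj, dif_neg hj, if_neg (fun hc => hj hc.2)]

theorem pvGetBang_replicate (n : Nat) (i : Nat) :
    (Array.replicate n true)[i]! = decide (i < n) := by
  rw [pvGetBang]
  split_ifs with h
  · rw [Array.getElem_replicate]
    have hn : i < n := by rwa [Array.size_replicate] at h
    simp [hn]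
  · have hn : ¬ i < n := by rwa [Array.size_replicate] at h
    simp [hn]

theorem pvMem_pvMults (N x i : Nat) (hx : 1 ≤ x) :
    i ∈ pvMults N x ↔ x ∣ i ∧ x * x ≤ i ∧ i ≤ N := by
  unfold pvMults pvCnt
  rw [List.mem_range']
  constructor
  · rintro ⟨j, hj, rfl⟩
    refine ⟨⟨x + j, by ring⟩, by omega, ?_⟩
    have h1 : (j + 1) * x ≤ (N + 1 - x * x + (x - 1)) / x * x :=
      Nat.mul_le_mul hj le_rfl
    have h2 : (N + 1 - x * x + (x - 1)) / x * x ≤ N + 1 - x * x + (x - 1) :=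
      Nat.div_mul_le_self _ x
    have h3 : (j + 1) * x = x * j + x := by ring
    omega
  · rintro ⟨⟨c, rfl⟩, h1, h2⟩
    have hc : x ≤ c := by
      by_contra hlt
      rw [not_le] at hlt
      have : x * (c + 1) ≤ x * x := Nat.mul_le_mul le_rfl hlt
      have h4 : x * (c + 1) = x * c + x := by ring
      omega
    refine ⟨c - x, ?_, ?_⟩
    · rw [Nat.lt_iff_add_one_le, Nat.le_div_iff_mul_le (by omega : 0 < x)]
      have e1 : (c - x + 1) * x = (c - x) * x + x := by ring
      have e2 : (c - x) * x = c * x - x * x := by rw [Nat.sub_mul]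
      have e3 : x * c = c * x := by ring
      have h4 : x * x ≤ c * x := Nat.mul_le_mul hc le_rfl
      omega
    · have e1 : x * (c - x) = x * c - x * x := by rw [Nat.mul_sub]
      have h4 : x * x ≤ x * c := Nat.mul_le_mul le_rfl hc
      omega

-- the inner fold: size, and the value at each index
theorem pvInner_size (l : List Nat) (s : Array Bool) :
    (l.foldl (fun t i => t.set! i false) s).size = s.size := by
  induction l generalizing s with
  | nil => rfl
  | cons x xs ih => rw [List.foldl_cons, ih]; simp [Array.set!]

theorem pvInner_get (l : List Nat) (s : Array Bool) (i : Nat) :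
    (l.foldl (fun t i => t.set! i false) s)[i]! =
      if i ∈ l ∧ i < s.size then false else s[i]! := by
  induction l generalizing s with
  | nil => simp
  | cons x xs ih =>
    rw [List.foldl_cons, ih, pvGetBang_set]
    simp only [Array.set!, Array.size_setIfInBounds, List.mem_cons]
    split_ifs <;> tauto

-- the outer fold: size, persistence of false, preservation of primes
theorem pvStep_size (N : Nat) (s : Array Bool) (x : Nat) :
    (pvSieveStep N s x).size = s.size := by
  unfold pvSieveStep
  split_ifs
  · exact pvInner_size _ _
  · rfl

theorem pvOuter_size (l : List Nat) (s : Array Bool) (N : Nat) :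
    (l.foldl (pvSieveStep N) s).size = s.size := by
  induction l generalizing s with
  | nil => rfl
  | cons x xs ih => rw [List.foldl_cons, ih, pvStep_size]

theorem pvOuter_false (l : List Nat) (s : Array Bool) (N i : Nat) (h : s[i]! = false) :
    (l.foldl (pvSieveStep N) s)[i]! = false := by
  induction l generalizing s with
  | nil => exact h
  | cons x xs ih =>
    rw [List.foldl_cons]
    apply ih
    unfold pvSieveStep
    split_ifs with hx
    · rw [pvInner_get]
      split_ifs
      · rfl
      · exact h
    · exact h

theorem pvOuter_prime (l : List Nat) (s : Array Bool) (N : Nat)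
    (hl : ∀ x ∈ l, 2 ≤ x)
    (hs : ∀ i, i ≤ N → Nat.Prime i → s[i]! = true) :
    ∀ i, i ≤ N → Nat.Prime i → (l.foldl (pvSieveStep N) s)[i]! = true := by
  induction l generalizing s with
  | nil => exact hs
  | cons x xs ih =>
    rw [List.foldl_cons]
    refine ih _ (fun y hy => hl y (List.mem_cons_of_mem _ hy)) ?_
    intro i hiN hip
    have hx2 : 2 ≤ x := hl x List.mem_cons_self
    unfold pvSieveStep
    split_ifs with hsx
    · rw [pvInner_get]
      split_ifs with hmm
      · exfalso
        obtain ⟨hdvd, hxx, -⟩ := (pvMem_pvMults N x i (by omega)).mp hmm.1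
        rcases hip.eq_one_or_self_of_dvd x hdvd with h | h
        · omega
        · subst h
          have : 2 * x ≤ x * x := Nat.mul_le_mul (by omega) le_rfl
          omega
      · exact hs i hiN hip
    · exact hs i hiN hip

-- the sieve characterisation
theorem pvSieve_get (N i : Nat) (h2 : 2 ≤ i) (hN : i ≤ N) :
    (pvSieve N)[i]! = true ↔ Nat.Prime i := by
  have hl0 : ∀ x ∈ List.range' 2 (Nat.sqrt N + 1 - 2), 2 ≤ x := by
    intro x hx
    obtain ⟨j, -, rfl⟩ := List.mem_range'.mp hx
    omega
  have hinit : ∀ j, j ≤ N → Nat.Prime j → (Array.replicate (N + 1) true)[j]! = true := by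
    intro j hj _
    rw [pvGetBang_replicate]
    simp
    omega
  constructor
  · intro htrue
    by_contra hnp
    have hp := Nat.minFac_prime (show i ≠ 1 by omega)
    have hdvd := Nat.minFac_dvd i
    have hsq : i.minFac * i.minFac ≤ i := by
      have := Nat.minFac_sq_le_self (show 0 < i by omega) hnp
      simpa [pow_two] using this
    have hp2 : 2 ≤ i.minFac := hp.two_le
    have hpsqrt : i.minFac ≤ Nat.sqrt N := Nat.le_sqrt.mpr (le_trans hsq hN)
    set p := i.minFac with hpdef
    have hsplit : List.range' 2 (Nat.sqrt N + 1 - 2) =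
        List.range' 2 (p - 2) ++ p :: List.range' (p + 1) (Nat.sqrt N - p) := by
      have e1 : Nat.sqrt N + 1 - 2 = (p - 2) + ((Nat.sqrt N - p) + 1) := by omega
      rw [e1, ← List.range'_append]
      have e2 : 2 + 1 * (p - 2) = p := by omega
      rw [e2, List.range'_succ]
    have hfalse : (pvSieve N)[i]! = false := by
      unfold pvSieve
      rw [hsplit, List.foldl_append, List.foldl_cons]
      apply pvOuter_false
      set s1 := (List.range' 2 (p - 2)).foldl (pvSieveStep N) (Array.replicate (N + 1) true)
        with hs1
      have hsize : s1.size = N + 1 := by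
        rw [hs1, pvOuter_size, Array.size_replicate]
      have hs1p : s1[p]! = true := by
        rw [hs1]
        exact pvOuter_prime _ _ _
          (fun y hy => hl0 y (by rw [hsplit]; exact List.mem_append_left _ hy))
          hinit p (le_trans hpsqrt (Nat.sqrt_le_self N)) hp
      unfold pvSieveStep
      rw [if_pos hs1p, pvInner_get]
      rw [if_pos ⟨(pvMem_pvMults N p i (by omega)).mpr ⟨hdvd, hsq, hN⟩, by omega⟩]
    rw [htrue] at hfalse
    simp at hfalse
  · intro hp
    unfold pvSieve
    exact pvOuter_prime _ _ _ hl0 hinit i hN hp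

-- trial division characterisation
theorem pvTrial_iff (fuel : Nat) (m d : Int) (h2 : 2 ≤ d)
    (hf : (m + 1 - d).toNat < fuel) :
    pvTrial fuel m d = true ↔ ∀ e : Int, d ≤ e → e * e ≤ m → ¬ (e ∣ m) := by
  induction fuel generalizing d with
  | zero => omega
  | succ f ih =>
    have hdd : 1 * d ≤ d * d := mul_le_mul_of_nonneg_right (by omega) (by omega)
    simp only [pvTrial]
    by_cases hdm : d * d ≤ m
    · rw [if_pos hdm]
      by_cases hmod : d ∣ m
      · have h0 : PySem.Int.mod m d = 0 := (PySem.Int.mod_eq_zero_iff_dvd m d).mpr hmod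
        rw [if_pos (by simp [h0])]
        simp only [Bool.false_eq_true, false_iff]
        exact fun h => (h d le_rfl hdm) hmod
      · have h0 : PySem.Int.mod m d ≠ 0 :=
          fun hh => hmod ((PySem.Int.mod_eq_zero_iff_dvd m d).mp hh)
        rw [if_neg (by simpa using h0)]
        rw [ih (d + 1) (by omega) (by omega)]
        constructor
        · intro hrec e he hem hdvd
          rcases eq_or_lt_of_le he with h | h
          · exact hmod (h ▸ hdvd)
          · exact hrec e (by omega) hem hdvd
        · exact fun hall e he hem => hall e (by omega) hem
    · rw [if_neg hdm]
      simp only [true_iff]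
      intro e he hem
      have : d * d ≤ e * e := mul_le_mul he he (by omega) (by omega)
      omega

theorem pvIsPrime_iff (m : Int) (hm : 0 ≤ m) :
    pvIsPrime m = true ↔ Nat.Prime m.toNat := by
  unfold pvIsPrime
  by_cases hm2 : m < 2
  · rw [if_pos hm2]
    simp only [Bool.false_eq_true, false_iff]
    intro hp
    have := hp.two_le
    omega
  · rw [if_neg hm2]
    rw [not_lt] at hm2
    have hmt : ((m.toNat : Int)) = m := Int.toNat_of_nonneg hm
    rw [pvTrial_iff (m.toNat + 1) m 2 le_rfl (by omega), Nat.prime_def_le_sqrt]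
    constructor
    · intro h
      refine ⟨by omega, fun k hk hks hkdvd => ?_⟩
      have h2 : (k : Int) * k ≤ m := by
        have := Nat.le_sqrt.mp hks
        rw [← hmt]
        exact_mod_cast this
      have h1 : (k : Int) ∣ m := by
        rw [← hmt]
        exact_mod_cast hkdvd
      exact h k (by exact_mod_cast hk) h2 h1
    · rintro ⟨-, hall⟩ e he hee hedvd
      have he0 : (0 : Int) ≤ e := by omega
      refine hall e.toNat (by omega) (Nat.le_sqrt.mpr ?_) ?_
      · have : ((e.toNat * e.toNat : Nat) : Int) ≤ ((m.toNat : Nat) : Int) := by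
          push_cast
          rw [Int.toNat_of_nonneg he0, hmt]
          exact hee
        exact_mod_cast this
      · have : ((e.toNat : Int)) ∣ ((m.toNat : Int)) := by
          rw [Int.toNat_of_nonneg he0, hmt]
          exact hedvd
        exact_mod_cast this

-- the two primality tests agree on every candidate the fib loop can produce
theorem pvContains_eq (n m : Int) (hn : 0 ≤ n) (hm : 0 ≤ m) (hmn : m < n) :
    ((PySem.List.pyRange 2 n).filter
        (fun p => (pvSieve n.toNat)[p.toNat]!)).contains m = pvIsPrime m := by
  by_cases h2 : 2 ≤ m
  · rw [Bool.eq_iff_iff, List.contains_iff_mem, List.mem_filter,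
      PySem.List.mem_pyRange_one, pvIsPrime_iff m hm,
      pvSieve_get n.toNat m.toNat (by omega) (by omega)]
    constructor
    · exact fun h => h.2
    · exact fun h => ⟨⟨h2, hmn⟩, h⟩
  · have hfalse : pvIsPrime m = false := by
      unfold pvIsPrime
      rw [if_pos (by omega)]
    rw [hfalse, ← Bool.not_eq_true, List.contains_iff_mem, List.mem_filter,
      PySem.List.mem_pyRange_one]
    intro hmem
    omega

theorem pvFib_filter (n : Int) (P : Int → Bool)
    (hP : ∀ m, 0 ≤ m → m < n → P m = pvIsPrime m) :
    ∀ (fuel : Nat) (a b : Int), 0 ≤ a → 0 ≤ b →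
      (pvFibA fuel n a b).filter P = pvFibB fuel n a b := by
  intro fuel
  induction fuel with
  | zero => intro a b _ _; simp [pvFibA, pvFibB]
  | succ f ih =>
    intro a b ha hb
    simp only [pvFibA, pvFibB]
    by_cases han : a < n
    · simp only [if_pos han, List.filter_cons, hP a ha han]
      by_cases hpa : pvIsPrime a = true
      · simp [hpa, ih b (a + b) hb (by omega)]
      · simp [Bool.not_eq_true] at hpa
        simp [hpa, ih b (a + b) hb (by omega)]
    · simp [if_neg han]

-- ===== VERDICT (by name: the statement is the Claim_ definition above) =====
theorem primesLessThanInFibonacci_spec : Claim_equal_primesLessThanInFibonacci := by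
  intro n _ hpre
  unfold Spec_primesLessThanInFibonacci primesLessThanInFibonacci primesLessThanInFibonacci_alt
  exact pvFib_filter n _ (fun m hm hmn => pvContains_eq n m hpre hm hmn) _ 0 1 le_rfl (by omega)

def primesLessThanInFibonacci_raises : Claim_raises_primesLessThanInFibonacci := by
  unfold Claim_raises_primesLessThanInFibonacci
  constructor
  · intro n _ hr hp
    unfold Raises_primesLessThanInFibonacci at hr
    unfold Pre_primesLessThanInFibonacci at hp
    omega
  · exact ⟨by decide, by decide, by decide⟩
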